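-- pv_equiv track=rewrite | github.com/ayoubc/competitive-programming | online_judges/codechef/CHEFSUM.py | solve
-- ===== SOURCE A (Python) =====
-- def solve(n, a):
--     prefix = [0] * n
--     for i in range(n):
--         if i == 0:
--             prefix[i] = a[i]
--         else:
--             prefix[i] = a[i] + prefix[i-1]
--
--     ans = 0
--     m = None
--     for i in range(n):
--         x = prefix[i] + prefix[n - 1]
--         if i > 0:
--             x -= prefix[i - 1]
--
--         if m is None or x < m:
--             m = x
--             ans = i
--
--     return ans + 1
-- ===== SOURCE B (Python) =====
-- def solve(n, a):
--     # Single pass: argmin of a[:n]; the prefix-sum total cancels in A's comparison.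
--     ans = 0
--     m = None
--     for i in range(n):
--         if m is None or a[i] < m:
--             m = a[i]
--             ans = i
--     return ans + 1
-- ===== Notes on version B (the rewrite author's own statement) =====
-- stated objective: faster
-- what changed: Dropped the prefix-sum table entirely: since prefix[i]+prefix[n-1]-prefix[i-1] = a[i]+total and total is constant, B is a single first-occurrence argmin pass over a[:n] (no O(n) table build, no extra list).
import Mathlib
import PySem

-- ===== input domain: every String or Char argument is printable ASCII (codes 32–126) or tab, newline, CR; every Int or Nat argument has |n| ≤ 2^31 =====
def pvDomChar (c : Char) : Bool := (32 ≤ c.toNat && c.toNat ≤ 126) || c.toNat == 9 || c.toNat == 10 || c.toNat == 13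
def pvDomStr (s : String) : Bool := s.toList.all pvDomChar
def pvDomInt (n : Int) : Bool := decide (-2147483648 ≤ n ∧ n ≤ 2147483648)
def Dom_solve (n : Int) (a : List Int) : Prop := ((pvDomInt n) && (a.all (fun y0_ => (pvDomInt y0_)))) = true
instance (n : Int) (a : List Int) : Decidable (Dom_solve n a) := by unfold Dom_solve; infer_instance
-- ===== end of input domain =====

-- B drops A's prefix-sum table (the added total cancels) for a single argmin pass over a[:n]; measurably faster (constant factor), return values proved equal on Pre_.

-- ===== PORT A =====
-- 'prefix = [0]*n' filled in order by 'prefix[i] = …': transliterated by appending the i-th value at step i.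
def solve (n : Int) (a : List Int) : Int :=
  let pre := (PySem.List.pyRange 0 n 1).foldl
    (fun p i =>
      p ++ [if i = 0 then PySem.List.pyGetD a i 0
            else PySem.List.pyGetD a i 0 + PySem.List.pyGetD p (i - 1) 0]) []
  let st := (PySem.List.pyRange 0 n 1).foldl
    (fun (st : Int × Option Int) i =>
      let x0 := PySem.List.pyGetD pre i 0 + PySem.List.pyGetD pre (n - 1) 0
      let x := if i > 0 then x0 - PySem.List.pyGetD pre (i - 1) 0 else x0
      match st.2 with
      | none => (i, some x)
      | some m => if x < m then (i, some x) else st) (0, none)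
  st.1 + 1

-- ===== PORT B =====
def solve_alt (n : Int) (a : List Int) : Int :=
  let st := (PySem.List.pyRange 0 n 1).foldl
    (fun (st : Int × Option Int) i =>
      let x := PySem.List.pyGetD a i 0
      match st.2 with
      | none => (i, some x)
      | some m => if x < m then (i, some x) else st) (0, none)
  st.1 + 1

-- ===== PRECONDITION & SPEC =====
-- Python A raises IndexError when n > len(a); it returns normally on every other input (n ≤ 0 included).
def Pre_solve (n : Int) (a : List Int) : Prop := n ≤ (a.length : Int)
instance (n : Int) (a : List Int) : Decidable (Pre_solve n a) := by unfold Pre_solve; infer_instance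
def pvWitness_solve : Int × List Int := (3, [5, 1, 1])

def Spec_solve (n : Int) (a : List Int) (out : Int) : Prop := out = solve_alt n a
instance (n : Int) (a : List Int) (out : Int) : Decidable (Spec_solve n a out) := by unfold Spec_solve; infer_instance

-- ===== CLAIM (what is proved, stated in full; the proofs are below) =====
def Claim_equal_solve : Prop := ∀ (n : Int) (a : List Int), Dom_solve n a → Pre_solve n a → Spec_solve n a (solve n a)

-- ===== LEMMAS AND PROOFS =====

-- partial sums of the first m elements
def pvS (a : List Int) (m : Nat) : Int := (a.take m).sum

-- A's first loop builds exactly the prefix-sum table over a[:k]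
lemma prefix_eq (a : List Int) (k : Nat) (hk : k ≤ a.length) :
    (PySem.List.pyRange 0 (k : Int) 1).foldl
      (fun p i =>
        p ++ [if i = 0 then PySem.List.pyGetD a i 0
              else PySem.List.pyGetD a i 0 + PySem.List.pyGetD p (i - 1) 0]) []
    = (List.range k).map (fun j => pvS a (j + 1)) := by
  induction k with
  | zero => simp [PySem.List.pyRange_one_eq_nil]
  | succ k ih =>
    have hk' : k ≤ a.length := Nat.le_of_succ_le hk
    have hsplit : PySem.List.pyRange 0 ((k + 1 : Nat) : Int) 1
        = PySem.List.pyRange 0 (k : Int) 1 ++ [(k : Int)] := by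
      push_cast
      exact PySem.List.pyRange_one_succ_right (by positivity)
    rw [hsplit, List.foldl_append, ih hk', List.range_succ, List.map_append]
    have hlt : k < a.length := hk
    simp only [List.foldl_cons, List.foldl_nil, List.map_cons, List.map_nil]
    congr 1
    by_cases h0 : k = 0
    · subst h0
      rcases a with _ | ⟨x, t⟩
      · simp at hlt
      · simp [pvS, PySem.List.pyGetD_zero_cons]
    · have hkc : ¬ ((k : Int) = 0) := by exact_mod_cast h0
      simp only [hkc, if_false]
      have h1 : PySem.List.pyGetD a (k : Int) 0 = a[k] := by
        rw [PySem.List.pyGetD_natCast]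
        exact List.getD_eq_getElem a 0 hlt
      have h2 : PySem.List.pyGetD ((List.range k).map (fun j => pvS a (j + 1))) ((k : Int) - 1) 0
          = pvS a k := by
        have hcast : ((k : Int) - 1) = ((k - 1 : Nat) : Int) := by omega
        rw [hcast, PySem.List.pyGetD_natCast]
        have hklt : k - 1 < k := by omega
        rw [List.getD_eq_getElem _ 0 (by simpa using hklt)]
        simp only [List.getElem_map, List.getElem_range]
        congr 1
        omega
      rw [h1, h2]
      have hs := List.sum_take_succ a k hlt
      simp only [pvS, List.cons.injEq, and_true]
      omega

-- offset invariance of the argmin loop: adding a constant to every compared value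
-- changes the tracked minimum by that constant and the tracked index not at all
lemma fold_offset (L : List Int) (g : Int → Int) (c : Int) :
    ∀ (ans : Int) (mo : Option Int),
    L.foldl (fun (st : Int × Option Int) i =>
        match st.2 with
        | none => (i, some (g i + c))
        | some m => if g i + c < m then (i, some (g i + c)) else st) (ans, mo.map (· + c))
    = (fun q : Int × Option Int => (q.1, q.2.map (· + c)))
      (L.foldl (fun (st : Int × Option Int) i =>
        match st.2 with
        | none => (i, some (g i))
        | some m => if g i < m then (i, some (g i)) else st) (ans, mo)) := by
  induction L with
  | nil => intro ans mo; rfl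
  | cons i L ih =>
    intro ans mo
    cases mo with
    | none => simpa using ih i (some (g i))
    | some m =>
      simp only [List.foldl_cons, Option.map_some]
      by_cases h : g i < m
      · have h' : g i + c < m + c := by omega
        simp only [h, h', if_true]
        simpa using ih i (some (g i))
      · have h' : ¬ (g i + c < m + c) := by omega
        simp only [h, h', if_false]
        simpa using ih ans (some m)

theorem solve_eq (n : Int) (a : List Int) (hpre : n ≤ (a.length : Int)) :
    solve n a = solve_alt n a := by
  by_cases hn : n ≤ 0
  · simp [solve, solve_alt, PySem.List.pyRange_one_eq_nil hn]
  · rw [Int.not_le] at hn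
    obtain ⟨k, hk⟩ : ∃ k : Nat, n = (k : Int) := ⟨n.toNat, (Int.toNat_of_nonneg hn.le).symm⟩
    subst hk
    have hkpos : 0 < k := by exact_mod_cast hn
    have hka : k ≤ a.length := by exact_mod_cast hpre
    simp only [solve, solve_alt]
    rw [prefix_eq a k hka]
    set P : List Int := (List.range k).map (fun j => pvS a (j + 1)) with hP
    have hPget : ∀ j : Nat, j < k → PySem.List.pyGetD P (j : Int) 0 = pvS a (j + 1) := by
      intro j hj
      rw [hP, PySem.List.pyGetD_natCast, List.getD_eq_getElem _ 0 (by simpa using hj)]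
      simp
    have hT : PySem.List.pyGetD P ((k : Int) - 1) 0 = pvS a k := by
      have hcast : ((k : Int) - 1) = ((k - 1 : Nat) : Int) := by omega
      rw [hcast, hPget (k - 1) (by omega)]
      congr 1
      omega
    -- rewrite A's loop body to the offset form a[i] + total on members of the range
    rw [PySem.List.foldl_congr_mem _ _
      (fun (st : Int × Option Int) i =>
        match st.2 with
        | none => (i, some (PySem.List.pyGetD a i 0 + pvS a k))
        | some m => if PySem.List.pyGetD a i 0 + pvS a k < m then
            (i, some (PySem.List.pyGetD a i 0 + pvS a k)) else st) _
      (by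
        intro st i hi
        rw [PySem.List.mem_pyRange_one] at hi
        obtain ⟨j, hj⟩ : ∃ j : Nat, i = (j : Int) := ⟨i.toNat, (Int.toNat_of_nonneg hi.1).symm⟩
        subst hj
        have hjk : j < k := by exact_mod_cast hi.2
        have hja : j < a.length := lt_of_lt_of_le hjk hka
        have hx : (if (j : Int) > 0
            then PySem.List.pyGetD P (j : Int) 0 + PySem.List.pyGetD P ((k : Int) - 1) 0
              - PySem.List.pyGetD P ((j : Int) - 1) 0
            else PySem.List.pyGetD P (j : Int) 0 + PySem.List.pyGetD P ((k : Int) - 1) 0)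
            = PySem.List.pyGetD a (j : Int) 0 + pvS a k := by
          have haj : PySem.List.pyGetD a (j : Int) 0 = a[j] := by
            rw [PySem.List.pyGetD_natCast]
            exact List.getD_eq_getElem a 0 hja
          have hsum := List.sum_take_succ a j hja
          by_cases hj0 : j = 0
          · subst hj0
            have h0 : PySem.List.pyGetD P 0 0 = pvS a 1 := by simpa using hPget 0 hjk
            simp only [Int.ofNat_zero, gt_iff_lt, lt_irrefl, if_false]
            rw [h0, hT]
            rcases a with _ | ⟨x, t⟩
            · simp at hja
            · simp [pvS, PySem.List.pyGetD_zero_cons]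
          · have hj0' : (0 : Int) < (j : Int) := by exact_mod_cast Nat.pos_of_ne_zero hj0
            simp only [gt_iff_lt, hj0', if_true]
            have hcast : ((j : Int) - 1) = ((j - 1 : Nat) : Int) := by omega
            rw [hPget j hjk, hT, hcast, hPget (j - 1) (by omega), haj]
            have : j - 1 + 1 = j := by omega
            rw [this]
            simp only [pvS] at hsum ⊢
            omega
        simp only [hx])]
    -- now apply the offset lemma with c = total
    have := fold_offset (PySem.List.pyRange 0 (k : Int) 1)
      (fun i => PySem.List.pyGetD a i 0) (pvS a k) 0 none
    simp only [Option.map_none] at this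
    rw [this]

-- ===== VERDICT (by name: the statement is the Claim_ definition above) =====
theorem solve_spec : Claim_equal_solve := by
  intro n a _ hpre
  unfold Spec_solve
  exact solve_eq n a hpre
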